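-- pv_equiv track=rewrite | github.com/rohitsmagdum13/vqm_ps | src/services/email_intake/relevance_filter.py | _has_auto_submitted_header
-- ===== SOURCE A (Python) =====
-- _AUTO_SUBMITTED_HEADERS = frozenset({
--     "auto-submitted",
--     "x-auto-response-suppress",
--     "x-autoreply",
--     "x-autorespond",
--     "list-unsubscribe",
--     "list-id",
-- })
--
-- def _has_auto_submitted_header(headers: dict[str, str]) -> bool:
--     """Return True when any auto-reply / bulk-list header is present."""
--     for name, value in headers.items():
--         if name not in _AUTO_SUBMITTED_HEADERS:
--             continue
--         # Auto-Submitted can legitimately be "no" — treat only the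
--         # affirmative values as auto-reply markers.
--         if name == "auto-submitted":
--             if value.strip().lower() not in {"", "no"}:
--                 return True
--             continue
--         return True
--     return False
-- ===== SOURCE B (Python) =====
-- _AUTO_SUBMITTED_HEADERS = frozenset({
--     "auto-submitted",
--     "x-auto-response-suppress",
--     "x-autoreply",
--     "x-autorespond",
--     "list-unsubscribe",
--     "list-id",
-- })
--
-- def _has_auto_submitted_header(headers: dict) -> bool:
--     """Probe the fixed header set against the dict instead of scanning items()."""
--     for name in ("x-auto-response-suppress", "x-autoreply",
--                  "x-autorespond", "list-unsubscribe", "list-id"):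
--         if name in headers:
--             return True
--     value = headers.get("auto-submitted")
--     return value is not None and value.strip().lower() not in ("", "no")
-- ===== Notes on version B (the rewrite author's own statement) =====
-- stated objective: idiomatic
-- what changed: B probes the fixed five presence-only header names directly in the dict and then handles the value-sensitive 'auto-submitted' key via a single .get, instead of scanning every item of the input and membership-testing each name against the frozenset.
import Mathlib
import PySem

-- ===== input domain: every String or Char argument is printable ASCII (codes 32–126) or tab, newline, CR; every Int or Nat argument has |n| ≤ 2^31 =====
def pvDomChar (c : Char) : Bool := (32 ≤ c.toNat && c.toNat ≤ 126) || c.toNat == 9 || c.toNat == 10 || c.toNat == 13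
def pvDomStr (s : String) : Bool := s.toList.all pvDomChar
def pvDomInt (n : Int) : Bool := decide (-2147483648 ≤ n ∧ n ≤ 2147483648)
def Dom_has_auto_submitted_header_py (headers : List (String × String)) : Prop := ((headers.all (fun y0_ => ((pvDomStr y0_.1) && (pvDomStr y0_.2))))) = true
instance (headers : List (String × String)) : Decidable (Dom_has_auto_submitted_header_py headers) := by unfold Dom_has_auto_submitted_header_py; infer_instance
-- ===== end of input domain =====

-- B probes the fixed header-name set against the dict instead of scanning items(); idiomatic, not faster.
-- Pre_ requires distinct keys: the Python argument is a dict, which cannot carry duplicate keys,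
-- so the association list representing it has Nodup keys by construction.

-- ===== PORT A =====
def pvAutoHeaders : List String :=
  ["auto-submitted", "x-auto-response-suppress", "x-autoreply", "x-autorespond",
   "list-unsubscribe", "list-id"]

def has_auto_submitted_header_py : List (String × String) → Bool
  | [] => false
  | (name, value) :: rest =>
    if pvAutoHeaders.contains name = false then
      has_auto_submitted_header_py rest
    else if name = "auto-submitted" then
      if (["", "no"].contains (PySem.Str.lower (PySem.Str.strip value))) = false then true
      else has_auto_submitted_header_py rest
    else true

-- ===== PORT B =====
def pvOtherHeaders : List String :=
  ["x-auto-response-suppress", "x-autoreply", "x-autorespond", "list-unsubscribe", "list-id"]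

def has_auto_submitted_header_py_alt (headers : List (String × String)) : Bool :=
  let d := PySem.Dict.mk headers
  if pvOtherHeaders.any (fun name => d.contains name) then true
  else
    match d.get? "auto-submitted" with
    | none => false
    | some value => !(["", "no"].contains (PySem.Str.lower (PySem.Str.strip value)))

-- ===== PRECONDITION & SPEC =====
-- Pre_ requires the association list's keys to be distinct — a Python dict cannot hold duplicate keys.
def Pre_has_auto_submitted_header_py (headers : List (String × String)) : Prop :=
  (headers.map Prod.fst).Nodup
instance (headers : List (String × String)) : Decidable (Pre_has_auto_submitted_header_py headers) := by
  unfold Pre_has_auto_submitted_header_py; infer_instance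

def pvWitness_has_auto_submitted_header_py : (List (String × String)) :=
  [("auto-submitted", "no"), ("list-id", "news.example.com")]

def Spec_has_auto_submitted_header_py (headers : List (String × String)) (out : Bool) : Prop := out = has_auto_submitted_header_py_alt headers
instance (headers : List (String × String)) (out : Bool) : Decidable (Spec_has_auto_submitted_header_py headers out) := by unfold Spec_has_auto_submitted_header_py; infer_instance

-- ===== CLAIM (what is proved, stated in full; the proofs are below) =====
def Claim_equal_has_auto_submitted_header_py : Prop := ∀ (headers : List (String × String)), Dom_has_auto_submitted_header_py headers → Pre_has_auto_submitted_header_py headers → Spec_has_auto_submitted_header_py headers (has_auto_submitted_header_py headers)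

-- ===== LEMMAS AND PROOFS =====
-- the per-entry condition that makes A return True
def pvQual (p : String × String) : Bool :=
  pvOtherHeaders.contains p.1 ||
    (p.1 == "auto-submitted" && !(["", "no"].contains (PySem.Str.lower (PySem.Str.strip p.2))))

lemma A_eq_any (headers : List (String × String)) :
    has_auto_submitted_header_py headers = headers.any pvQual := by
  induction headers with
  | nil => rfl
  | cons p rest ih =>
    obtain ⟨name, value⟩ := p
    simp only [has_auto_submitted_header_py, List.any_cons, pvQual]
    by_cases h1 : name = "auto-submitted"
    · subst h1
      simp [pvAutoHeaders, pvOtherHeaders, ih]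
    · by_cases h3 : pvOtherHeaders.contains name = true <;>
        simp_all [pvAutoHeaders, pvOtherHeaders]

lemma any_congr_mem {α : Type} (l : List α) (p q : α → Bool)
    (h : ∀ a ∈ l, p a = q a) : l.any p = l.any q := by
  induction l with
  | nil => rfl
  | cons a l ih =>
    rw [List.any_cons, List.any_cons, h a (by simp), ih (fun b hb => h b (List.mem_cons_of_mem _ hb))]

lemma get?_auto (headers : List (String × String))
    (hnd : (headers.map Prod.fst).Nodup) :
    (headers.any fun p => p.1 == "auto-submitted" && !(["", "no"].contains (PySem.Str.lower (PySem.Str.strip p.2)))) =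
    (match (PySem.Dict.mk headers).get? "auto-submitted" with
     | none => false
     | some value => !(["", "no"].contains (PySem.Str.lower (PySem.Str.strip value)))) := by
  induction headers with
  | nil => rfl
  | cons p rest ih =>
    obtain ⟨name, value⟩ := p
    simp only [List.map_cons, List.nodup_cons] at hnd
    rw [List.any_cons, PySem.Dict.get?_mk_cons]
    by_cases h : name = "auto-submitted"
    · subst h
      have hrest : rest.any (fun p => p.1 == "auto-submitted" && !(["", "no"].contains (PySem.Str.lower (PySem.Str.strip p.2)))) = false := by
        rw [List.any_eq_false]
        rintro ⟨k, v⟩ hk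
        have hne : k ≠ "auto-submitted" := by
          intro he; exact hnd.1 (he ▸ List.mem_map_of_mem hk)
        simp [hne]
      rw [hrest]
      have e : ("auto-submitted" == "auto-submitted") = true := by simp
      simp only [e, Bool.true_and, Bool.or_false, if_true]
    · have e : (name == "auto-submitted") = false := by simp [h]
      simp only [e, Bool.false_and, Bool.false_or, Bool.false_eq_true, if_false]
      exact ih hnd.2

theorem equal_proof : ∀ (headers : List (String × String)),
    Pre_has_auto_submitted_header_py headers →
    has_auto_submitted_header_py headers = has_auto_submitted_header_py_alt headers := by
  intro headers hpre
  rw [A_eq_any]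
  unfold has_auto_submitted_header_py_alt
  simp only []
  by_cases hoth : pvOtherHeaders.any (fun name => (PySem.Dict.mk headers).contains name) = true
  · -- some presence-only header is in the dict: both sides are true
    simp only [hoth, if_true]
    rw [List.any_eq_true] at hoth ⊢
    obtain ⟨n, hn, hc⟩ := hoth
    simp only [PySem.Dict.contains_mk] at hc
    rw [List.any_eq_true] at hc
    obtain ⟨p, hp, he⟩ := hc
    refine ⟨p, hp, ?_⟩
    simp only [pvQual, Bool.or_eq_true]
    left
    simp only [beq_iff_eq] at he
    rw [List.contains_eq_mem, decide_eq_true_iff]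
    exact he ▸ hn
  · rw [Bool.not_eq_true] at hoth
    simp only [hoth, Bool.false_eq_true, if_false]
    rw [← get?_auto headers hpre]
    apply any_congr_mem
    rintro ⟨k, v⟩ hk
    have hno : pvOtherHeaders.contains k = false := by
      by_contra hc
      rw [Bool.not_eq_false, List.contains_eq_mem, decide_eq_true_iff] at hc
      have ht : pvOtherHeaders.any (fun name => (PySem.Dict.mk headers).contains name) = true := by
        rw [List.any_eq_true]
        refine ⟨k, hc, ?_⟩
        simp only [PySem.Dict.contains_mk]
        rw [List.any_eq_true]
        exact ⟨(k, v), hk, by simp⟩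
      rw [ht] at hoth
      exact absurd hoth (by simp)
    simp only [pvQual, hno, Bool.false_or]

-- ===== VERDICT (by name: the statement is the Claim_ definition above) =====
theorem has_auto_submitted_header_py_spec : Claim_equal_has_auto_submitted_header_py := by
  intro headers _ hpre
  unfold Spec_has_auto_submitted_header_py
  exact equal_proof headers hpre
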